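-- pv_equiv track=rewrite | github.com/YasamanMoradifard/empkins-depression-multimodal | scripts/5_MultiModal/report.py | parse_config_folder_name
-- ===== SOURCE A (Python) =====
-- from typing import List, Optional, Tuple
--
-- MODALITIES = {"audio", "ecg", "emg", "rsp", "text", "video"}
--
-- def parse_config_folder_name(config_folder_name: str) -> Tuple[str, str, str, str]:
--     """
--     Parse config folder name to get condition, phase, aggregation_method, and subsheet key.
--     Returns (condition, phase, aggregation_method, subsheet_key).
--     subsheet_key is one of: by_ID_inc_text, by_ID_exc_text, by_phase_inc_text, by_phase_exc_text.
--     """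
--     # Aggregation
--     if config_folder_name.endswith("_by_ID"):
--         aggregation_method = "by_ID"
--         base = config_folder_name[:-6]
--     elif config_folder_name.endswith("_byPhase"):
--         aggregation_method = "by_phase"
--         base = config_folder_name[:-8]
--     else:
--         return "", "", "", ""
--
--     # Text included?
--     inc_text = "_text_" in config_folder_name or config_folder_name.endswith("_text")
--     if aggregation_method == "by_ID":
--         subsheet_key = "by_ID_inc_text" if inc_text else "by_ID_exc_text"
--     else:
--         subsheet_key = "by_phase_inc_text" if inc_text else "by_phase_exc_text"
--
--     # Strip Early_Fusion_ or Late_Fusion_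
--     if base.startswith("Early_Fusion_"):
--         base = base[12:]
--     elif base.startswith("Late_Fusion_"):
--         base = base[11:]
--     else:
--         return "", "", aggregation_method, subsheet_key
--
--     tokens = base.split("_")
--     condition_phase_tokens = []
--     for t in reversed(tokens):
--         if t.lower() in MODALITIES:
--             break
--         condition_phase_tokens.append(t)
--     condition_phase_tokens.reverse()
--
--     if len(condition_phase_tokens) == 0:
--         condition, phase = "", ""
--     elif len(condition_phase_tokens) == 1:
--         condition, phase = condition_phase_tokens[0], ""
--     else:
--         condition = condition_phase_tokens[0]
--         phase = "_".join(condition_phase_tokens[1:])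
--
--     return condition, phase, aggregation_method, subsheet_key
-- ===== SOURCE B (Python) =====
-- MODALITIES = {"audio", "ecg", "emg", "rsp", "text", "video"}
--
-- def parse_config_folder_name(config_folder_name: str):
--     # Aggregation suffix
--     if config_folder_name.endswith("_by_ID"):
--         aggregation_method = "by_ID"
--         base = config_folder_name.removesuffix("_by_ID")
--     elif config_folder_name.endswith("_byPhase"):
--         aggregation_method = "by_phase"
--         base = config_folder_name.removesuffix("_byPhase")
--     else:
--         return "", "", "", ""
--
--     inc_text = "_text_" in config_folder_name or config_folder_name.endswith("_text")
--     subsheet_key = aggregation_method + ("_inc_text" if inc_text else "_exc_text")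
--
--     # Fusion prefix (stripped in full, unlike A's off-by-one slice)
--     if base.startswith("Early_Fusion_"):
--         rest = base.removeprefix("Early_Fusion_")
--     elif base.startswith("Late_Fusion_"):
--         rest = base.removeprefix("Late_Fusion_")
--     else:
--         return "", "", aggregation_method, subsheet_key
--
--     # Forward scan: index of the last modality token
--     tokens = rest.split("_")
--     last_mod = -1
--     for i, t in enumerate(tokens):
--         if t.lower() in MODALITIES:
--             last_mod = i
--     cpt = tokens[last_mod + 1:]
--     condition = cpt[0] if cpt else ""
--     phase = "_".join(cpt[1:])
--     return condition, phase, aggregation_method, subsheet_key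
-- ===== Notes on version B (the rewrite author's own statement) =====
-- stated objective: simpler
-- what changed: B strips the aggregation/fusion affixes with removesuffix/removeprefix and finds the condition/phase tokens by a single forward scan recording the last modality index followed by one slice, instead of A's negative-index slices, reverse-iterate-and-break accumulation, second reverse and three-way length case split; the key is built by concatenation.
-- intended difference: On names with an aggregation suffix and a fusion prefix whose remaining part is nonempty and contains no modality token, A's off-by-one prefix slice ([12:]/[11:] for the 13/12-char prefixes) leaves a leading empty token, so A returns an empty condition and the whole remainder as the phase, while B strips the full prefix and returns the first remaining token as the condition and the rest as the phase, which is the parse the docstring intends. — e.g. on parse_config_folder_name("Early_Fusion_MDD_p1_by_ID"): A returns ("", "MDD_p1", "by_ID", "by_ID_exc_text"), B returns ("MDD", "p1", "by_ID", "by_ID_exc_text")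
import Mathlib
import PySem

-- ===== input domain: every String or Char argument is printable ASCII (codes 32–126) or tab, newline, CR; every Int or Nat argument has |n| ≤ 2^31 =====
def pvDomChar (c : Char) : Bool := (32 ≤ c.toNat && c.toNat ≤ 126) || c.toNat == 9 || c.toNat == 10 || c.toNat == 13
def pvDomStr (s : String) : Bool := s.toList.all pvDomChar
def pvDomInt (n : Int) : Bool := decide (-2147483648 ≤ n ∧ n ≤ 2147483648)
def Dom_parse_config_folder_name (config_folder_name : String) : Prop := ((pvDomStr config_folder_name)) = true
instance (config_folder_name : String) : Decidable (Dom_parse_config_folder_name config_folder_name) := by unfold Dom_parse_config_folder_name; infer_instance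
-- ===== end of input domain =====

-- B strips the affixes with removesuffix/removeprefix and finds condition/phase by a forward scan for the
-- last modality token plus one slice (A uses negative-index slices, a reverse-collect loop with break and a
-- three-way length split); outside D_ the return values are proved equal.

-- MODALITIES = {"audio", "ecg", "emg", "rsp", "text", "video"}  (module constant, shared by both Pythons)
def MODALITIES : PySem.Set String := PySem.Set.ofList ["audio", "ecg", "emg", "rsp", "text", "video"]

-- ===== PORT A =====
-- 'for t in reversed(tokens): if t.lower() in MODALITIES: break ; condition_phase_tokens.append(t)'
def pvA_collect : List String → List String → List String
  | [], acc => acc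
  | t :: rest, acc =>
    if PySem.Set.contains MODALITIES (PySem.Str.lower t) then acc
    else pvA_collect rest (acc ++ [t])

-- the tail of A: condition_phase_tokens, then the three-way length split
def pvA_condPhase (tokens : List String) : String × String :=
  let cpt := (pvA_collect tokens.reverse []).reverse
  if cpt.length == 0 then ("", "")
  else if cpt.length == 1 then (PySem.List.pyGetD cpt 0 "", "")   -- cpt[0]: exact, 0 < cpt.length here
  else (PySem.List.pyGetD cpt 0 "", PySem.Str.join "_" (PySem.List.slice cpt (some 1) none))

def pvA_fusion (base aggregation_method subsheet_key : String) : String × String × String × String :=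
  if PySem.Str.startswith base "Early_Fusion_" then
    let tokens := (PySem.Str.split? (PySem.Str.slice base (some 12) none) "_").getD []   -- split("_"): sep ≠ "", exact
    let cp := pvA_condPhase tokens
    (cp.1, cp.2, aggregation_method, subsheet_key)
  else if PySem.Str.startswith base "Late_Fusion_" then
    let tokens := (PySem.Str.split? (PySem.Str.slice base (some 11) none) "_").getD []
    let cp := pvA_condPhase tokens
    (cp.1, cp.2, aggregation_method, subsheet_key)
  else ("", "", aggregation_method, subsheet_key)

def pvA_agg (config_folder_name base aggregation_method : String) : String × String × String × String :=
  let inc_text := PySem.Str.isIn "_text_" config_folder_name || PySem.Str.endswith config_folder_name "_text"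
  let subsheet_key :=
    if aggregation_method == "by_ID" then (if inc_text then "by_ID_inc_text" else "by_ID_exc_text")
    else (if inc_text then "by_phase_inc_text" else "by_phase_exc_text")
  pvA_fusion base aggregation_method subsheet_key

def parse_config_folder_name (config_folder_name : String) : String × String × String × String :=
  if PySem.Str.endswith config_folder_name "_by_ID" then
    pvA_agg config_folder_name (PySem.Str.slice config_folder_name none (some (-6))) "by_ID"
  else if PySem.Str.endswith config_folder_name "_byPhase" then
    pvA_agg config_folder_name (PySem.Str.slice config_folder_name none (some (-8))) "by_phase"
  else ("", "", "", "")

-- ===== PORT B =====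
-- str.removesuffix / str.removeprefix (hand ports, exact: strip exactly when present)
def pvRemovesuffix (s suf : String) : String :=
  if PySem.Str.endswith s suf then String.ofList (s.toList.take (s.toList.length - suf.toList.length)) else s

def pvRemoveprefix (s pre : String) : String :=
  if PySem.Str.startswith s pre then String.ofList (s.toList.drop pre.toList.length) else s

-- 'last_mod = -1 ; for i, t in enumerate(tokens): if t.lower() in MODALITIES: last_mod = i'
def pvB_lastMod (tokens : List String) : Int :=
  (PySem.List.enumerate tokens 0).foldl
    (fun last_mod it => if PySem.Set.contains MODALITIES (PySem.Str.lower it.2) then it.1 else last_mod) (-1)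

def pvB_tail (rest aggregation_method subsheet_key : String) : String × String × String × String :=
  let tokens := (PySem.Str.split? rest "_").getD []   -- split("_"): sep ≠ "", exact
  let cpt := PySem.List.slice tokens (some (pvB_lastMod tokens + 1)) none
  let condition := if cpt.isEmpty then "" else PySem.List.pyGetD cpt 0 ""   -- cpt[0]: guarded by 'if cpt'
  let phase := PySem.Str.join "_" (PySem.List.slice cpt (some 1) none)
  (condition, phase, aggregation_method, subsheet_key)

def pvB_agg (config_folder_name base aggregation_method : String) : String × String × String × String :=
  let inc_text := PySem.Str.isIn "_text_" config_folder_name || PySem.Str.endswith config_folder_name "_text"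
  let subsheet_key := aggregation_method ++ (if inc_text then "_inc_text" else "_exc_text")
  if PySem.Str.startswith base "Early_Fusion_" then
    pvB_tail (pvRemoveprefix base "Early_Fusion_") aggregation_method subsheet_key
  else if PySem.Str.startswith base "Late_Fusion_" then
    pvB_tail (pvRemoveprefix base "Late_Fusion_") aggregation_method subsheet_key
  else ("", "", aggregation_method, subsheet_key)

def parse_config_folder_name_alt (config_folder_name : String) : String × String × String × String :=
  if PySem.Str.endswith config_folder_name "_by_ID" then
    pvB_agg config_folder_name (pvRemovesuffix config_folder_name "_by_ID") "by_ID"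
  else if PySem.Str.endswith config_folder_name "_byPhase" then
    pvB_agg config_folder_name (pvRemovesuffix config_folder_name "_byPhase") "by_phase"
  else ("", "", "", "")

-- ===== PRECONDITION & SPEC =====
-- On names with an aggregation suffix and a fusion prefix whose remaining part is nonempty and contains no
-- modality token, A's off-by-one prefix slice ([12:]/[11:] for the 13/12-char prefixes) leaves a leading empty
-- token, so A returns an empty condition and the whole remainder as the phase; B strips the full prefix and
-- returns the first remaining token as the condition and the rest as the phase, the parse the docstring intends.
def D_parse_config_folder_name (config_folder_name : String) : Prop :=
  ∃ suf ∈ ["_by_ID".toList, "_byPhase".toList],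
    ∃ pre ∈ ["Early_Fusion_".toList, "Late_Fusion_".toList],
      suf <:+ config_folder_name.toList ∧
      pre <+: config_folder_name.toList.take (config_folder_name.toList.length - suf.length) ∧
      (config_folder_name.toList.take (config_folder_name.toList.length - suf.length)).drop pre.length ≠ [] ∧
      ∀ t ∈ ((config_folder_name.toList.take (config_folder_name.toList.length - suf.length)).drop pre.length).splitOn '_',
        PySem.Chars.lower t ∉ MODALITIES.map String.toList

instance (config_folder_name : String) : Decidable (D_parse_config_folder_name config_folder_name) := by
  unfold D_parse_config_folder_name; infer_instance

def Spec_parse_config_folder_name (config_folder_name : String) (out : String × String × String × String) : Prop :=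
  ¬ D_parse_config_folder_name config_folder_name → out = parse_config_folder_name_alt config_folder_name

instance (config_folder_name : String) (out : String × String × String × String) :
    Decidable (Spec_parse_config_folder_name config_folder_name out) := by
  unfold Spec_parse_config_folder_name; infer_instance

def pvDiffWitness_parse_config_folder_name : String := "Early_Fusion_MDD_p1_by_ID"

def pvDiffWitnessOut_parse_config_folder_name :
    (String × String × String × String) × (String × String × String × String) :=
  (("", "MDD_p1", "by_ID", "by_ID_exc_text"), ("MDD", "p1", "by_ID", "by_ID_exc_text"))

-- ===== CLAIM (what is proved, stated in full; the proofs are below) =====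
def Claim_unchanged_parse_config_folder_name : Prop :=
  ∀ (config_folder_name : String), Dom_parse_config_folder_name config_folder_name →
    Spec_parse_config_folder_name config_folder_name (parse_config_folder_name config_folder_name)

def Claim_changed_parse_config_folder_name : Prop :=
  Dom_parse_config_folder_name (pvDiffWitness_parse_config_folder_name) ∧
  D_parse_config_folder_name (pvDiffWitness_parse_config_folder_name) ∧
  parse_config_folder_name (pvDiffWitness_parse_config_folder_name) = pvDiffWitnessOut_parse_config_folder_name.1 ∧
  parse_config_folder_name_alt (pvDiffWitness_parse_config_folder_name) = pvDiffWitnessOut_parse_config_folder_name.2 ∧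
  pvDiffWitnessOut_parse_config_folder_name.1 ≠ pvDiffWitnessOut_parse_config_folder_name.2

def Claim_exact_parse_config_folder_name : Prop :=
  ∀ (config_folder_name : String), Dom_parse_config_folder_name config_folder_name →
    D_parse_config_folder_name config_folder_name →
    parse_config_folder_name config_folder_name ≠ parse_config_folder_name_alt config_folder_name

-- ===== LEMMAS AND PROOFS =====

-- proof-only helpers: the loop predicate and the modality-free suffix both loops compute
def pvQ (t : String) : Bool := !(PySem.Set.contains MODALITIES (PySem.Str.lower t))

def pvSuffix (ts : List String) : List String := (ts.reverse.takeWhile pvQ).reverse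

-- Bool mirror of D_ used only inside the proofs
def pvIsMod (t : List Char) : Bool := (MODALITIES.map String.toList).contains (PySem.Chars.lower t)

def pvD_rest (r : List Char) : Bool :=
  !r.isEmpty && (r.splitOn '_').all (fun t => !pvIsMod t)

def pvD_base (b : List Char) : Bool :=
  if PySem.Chars.startswith b "Early_Fusion_".toList then pvD_rest (b.drop 13)
  else if PySem.Chars.startswith b "Late_Fusion_".toList then pvD_rest (b.drop 12)
  else false

theorem pv_go_eq (fuel : Nat) : ∀ (l cur : List Char) (acc : List (List Char)), l.length < fuel →
    PySem.Chars.splitOn.go ['_'] fuel l cur acc =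
      acc.reverse ++ (cur.reverse ++ (l.splitOn '_').headD []) :: (l.splitOn '_').tail := by
  induction fuel with
  | zero => intro l cur acc h; omega
  | succ fuel ih =>
    intro l cur acc h
    cases l with
    | nil => simp [PySem.Chars.splitOn.go, List.splitOn_nil]
    | cons c rest =>
      by_cases hc : c = '_'
      · subst hc
        rw [show PySem.Chars.splitOn.go ['_'] (fuel+1) ('_' :: rest) cur acc
              = PySem.Chars.splitOn.go ['_'] fuel rest [] (cur.reverse :: acc) by
            simp [PySem.Chars.splitOn.go, List.isPrefixOf]]
        rw [ih rest [] (cur.reverse :: acc) (by simpa using Nat.lt_of_succ_lt_succ h)]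
        obtain ⟨h0, t0, e⟩ := List.exists_cons_of_ne_nil (List.splitOnP_ne_nil (· == '_') rest)
        simp [List.splitOn, List.splitOnP_cons, e] at *
      · rw [show PySem.Chars.splitOn.go ['_'] (fuel+1) (c :: rest) cur acc
              = PySem.Chars.splitOn.go ['_'] fuel rest (c :: cur) acc by
            simp [PySem.Chars.splitOn.go, List.isPrefixOf]
            intro h'; exact absurd h'.symm hc]
        rw [ih rest (c :: cur) acc (by simpa using Nat.lt_of_succ_lt_succ h)]
        obtain ⟨h0, t0, e⟩ := List.exists_cons_of_ne_nil (List.splitOnP_ne_nil (· == '_') rest)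
        simp [List.splitOn, List.splitOnP_cons, hc, e]

theorem pv_splitOn_eq (l : List Char) : PySem.Chars.splitOn l ['_'] = l.splitOn '_' := by
  have h := pv_go_eq (l.length + 1) l [] [] (by omega)
  obtain ⟨h0, t0, e⟩ := List.exists_cons_of_ne_nil (List.splitOnP_ne_nil (· == '_') l)
  rw [PySem.Chars.splitOn, h]
  simp [List.splitOn] at e ⊢
  simp [e]

theorem pv_split_us (x : String) :
    (PySem.Str.split? x "_").getD [] = (x.toList.splitOn '_').map String.ofList := by
  have hu : ("_" : String).toList = ['_'] := rfl
  simp [PySem.Str.split?, PySem.Chars.split?, hu, pv_splitOn_eq]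

theorem pvA_collect_eq (l : List String) : ∀ acc, pvA_collect l acc = acc ++ l.takeWhile pvQ := by
  induction l with
  | nil => intro acc; simp [pvA_collect]
  | cons t rest ih =>
    intro acc
    by_cases hm : PySem.Str.lower t ∈ MODALITIES
    · simp [pvA_collect, pvQ, hm]
    · simp [pvA_collect, pvQ, hm, ih]

theorem pvB_lastMod_append (l : List String) (t : String) :
    pvB_lastMod (l ++ [t]) = if pvQ t then pvB_lastMod l else (l.length : Int) := by
  by_cases hm : PySem.Str.lower t ∈ MODALITIES <;>
    simp [pvB_lastMod, PySem.List.enumerate_append, List.foldl_append,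
          PySem.List.enumerate_cons, PySem.List.enumerate_nil, pvQ, hm]

theorem pvB_lastMod_lt (ts : List String) : pvB_lastMod ts < (ts.length : Int) := by
  induction ts using List.reverseRecOn with
  | nil => simp [pvB_lastMod, PySem.List.enumerate_nil]
  | append_singleton l t ih =>
    rw [pvB_lastMod_append]
    have h := ih
    split
    · simp; omega
    · simp

theorem pvB_lastMod_ge (ts : List String) : -1 ≤ pvB_lastMod ts := by
  induction ts using List.reverseRecOn with
  | nil => simp [pvB_lastMod, PySem.List.enumerate_nil]
  | append_singleton l t ih =>
    rw [pvB_lastMod_append]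
    split
    · exact ih
    · omega

theorem pvB_drop (ts : List String) :
    ts.drop (pvB_lastMod ts + 1).toNat = pvSuffix ts := by
  induction ts using List.reverseRecOn with
  | nil => simp [pvB_lastMod, pvSuffix, PySem.List.enumerate_nil]
  | append_singleton l t ih =>
    rw [pvB_lastMod_append]
    unfold pvSuffix
    rw [List.reverse_append]
    by_cases hq : pvQ t
    · rw [if_pos hq]
      have hle : (pvB_lastMod l + 1).toNat ≤ l.length := by
        have := pvB_lastMod_lt l; omega
      rw [List.drop_append_of_le_length hle, ih]
      simp [hq, pvSuffix]
    · rw [if_neg hq]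
      have hlen : ((l.length : Int) + 1).toNat = l.length + 1 := by omega
      rw [hlen, List.drop_eq_nil_of_le (by simp)]
      simp [hq]

theorem pvB_cpt (ts : List String) :
    PySem.List.slice ts (some (pvB_lastMod ts + 1)) none = pvSuffix ts := by
  rw [PySem.List.slice_from ts (by have := pvB_lastMod_ge ts; omega), pvB_drop]

theorem pvA_condPhase_eq (tokens : List String) :
    pvA_condPhase tokens =
      ((if (pvSuffix tokens).isEmpty then "" else PySem.List.pyGetD (pvSuffix tokens) 0 ""),
       PySem.Str.join "_" (PySem.List.slice (pvSuffix tokens) (some 1) none)) := by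
  have hc : (pvA_collect tokens.reverse []).reverse = pvSuffix tokens := by
    rw [pvA_collect_eq]; rfl
  unfold pvA_condPhase
  rw [hc]
  cases hs : pvSuffix tokens with
  | nil => rfl
  | cons x rest =>
    cases rest with
    | nil => rfl
    | cons y rs => simp [PySem.Str.join]

theorem pvB_tail_eq (rest agg key : String) :
    pvB_tail rest agg key =
      ((if (pvSuffix ((rest.toList.splitOn '_').map String.ofList)).isEmpty then ""
        else PySem.List.pyGetD (pvSuffix ((rest.toList.splitOn '_').map String.ofList)) 0 ""),
       PySem.Str.join "_" (PySem.List.slice (pvSuffix ((rest.toList.splitOn '_').map String.ofList)) (some 1) none),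
       agg, key) := by
  unfold pvB_tail
  dsimp only
  rw [pv_split_us]
  rw [pvB_cpt]

theorem pv_lower_ofList (tc : List Char) :
    PySem.Str.lower (String.ofList tc) = String.ofList (PySem.Chars.lower tc) := by
  simp [PySem.Str.lower]

theorem pv_ofList_inj {a b : List Char} : String.ofList a = String.ofList b ↔ a = b := by
  constructor
  · intro h; have := congrArg String.toList h; simpa using this
  · intro h; rw [h]

theorem pvQ_ofList (tc : List Char) : pvQ (String.ofList tc) = !pvIsMod tc := by
  have hM : MODALITIES = ["audio", "ecg", "emg", "rsp", "text", "video"] := by decide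
  simp [pvQ, pvIsMod, hM, PySem.Set.contains, pv_lower_ofList, List.contains_eq_mem,
        ← String.toList_inj, String.toList_ofList]

theorem pv_takeWhile_append_of_exists {p : String → Bool} (l l' : List String)
    (h : ∃ x ∈ l, p x = false) : (l ++ l').takeWhile p = l.takeWhile p := by
  rw [List.takeWhile_append]
  have hne : ¬ (l.takeWhile p).length = l.length := by
    intro he
    have hself := (List.takeWhile_prefix (l := l) (p := p)).eq_of_length he
    obtain ⟨x, hx, hpx⟩ := h
    have := (List.takeWhile_eq_self_iff.mp hself) x hx
    simp [hpx] at this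
  simp [hne]

theorem pvSuffix_cons_emp (ts : List String) (h : ∃ t ∈ ts, pvQ t = false) :
    pvSuffix ("" :: ts) = pvSuffix ts := by
  unfold pvSuffix
  rw [List.reverse_cons, pv_takeWhile_append_of_exists]
  obtain ⟨t, ht, hq⟩ := h
  exact ⟨t, by simpa using ht, hq⟩

theorem pvSuffix_of_all (ts : List String) (h : ∀ t ∈ ts, pvQ t = true) : pvSuffix ts = ts := by
  unfold pvSuffix
  rw [List.takeWhile_eq_self_iff.mpr (fun x hx => h x (by simpa using hx))]
  simp

theorem pvD_rest_false (r : List Char) (hr : pvD_rest r = false) :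
    r = [] ∨ ∃ t ∈ r.splitOn '_', pvIsMod t = true := by
  by_cases h0 : r = []
  · exact Or.inl h0
  · right
    simp [pvD_rest, h0] at hr
    obtain ⟨t, ht, hmod⟩ := hr
    exact ⟨t, ht, hmod⟩

theorem pv_fusion_eq (r : List Char) (agg key : String) (hr : pvD_rest r = false) :
    ((pvA_condPhase ("" :: (r.splitOn '_').map String.ofList)).1,
     (pvA_condPhase ("" :: (r.splitOn '_').map String.ofList)).2, agg, key)
      = pvB_tail (String.ofList r) agg key := by
  rw [pvB_tail_eq]
  simp only [String.toList_ofList]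
  rw [pvA_condPhase_eq]
  rcases pvD_rest_false r hr with h | h
  · subst h; rfl
  · obtain ⟨tc, htc, hmod⟩ := h
    rw [pvSuffix_cons_emp]
    exact ⟨String.ofList tc, List.mem_map_of_mem htc, by rw [pvQ_ofList, hmod]; rfl⟩

theorem pv_startswith_early (b : List Char) :
    PySem.Chars.startswith b "Early_Fusion_".toList = true ↔ ∃ r, b = "Early_Fusion_".toList ++ r := by
  rw [PySem.Chars.startswith_iff]
  constructor
  · rintro ⟨t, ht⟩; exact ⟨t, ht.symm⟩
  · rintro ⟨t, ht⟩; exact ⟨t, ht.symm⟩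

theorem pv_startswith_late (b : List Char) :
    PySem.Chars.startswith b "Late_Fusion_".toList = true ↔ ∃ r, b = "Late_Fusion_".toList ++ r := by
  rw [PySem.Chars.startswith_iff]
  constructor
  · rintro ⟨t, ht⟩; exact ⟨t, ht.symm⟩
  · rintro ⟨t, ht⟩; exact ⟨t, ht.symm⟩

theorem pv_tokensA_early (base : String) (r : List Char) (hb : base.toList = "Early_Fusion_".toList ++ r) :
    (PySem.Str.split? (PySem.Str.slice base (some 12) none) "_").getD []
      = "" :: (r.splitOn '_').map String.ofList := by
  rw [pv_split_us]
  have h12 : (PySem.Str.slice base (some 12) none).toList = '_' :: r := by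
    simp [PySem.Str.slice, PySem.Chars.slice_eq_listSlice, hb]
    rw [PySem.List.slice_from _ (show (0:Int) ≤ 12 by omega)]
    rfl
  rw [h12]
  simp [List.splitOn, List.splitOnP_cons]

theorem pv_tokensA_late (base : String) (r : List Char) (hb : base.toList = "Late_Fusion_".toList ++ r) :
    (PySem.Str.split? (PySem.Str.slice base (some 11) none) "_").getD []
      = "" :: (r.splitOn '_').map String.ofList := by
  rw [pv_split_us]
  have h11 : (PySem.Str.slice base (some 11) none).toList = '_' :: r := by
    simp [PySem.Str.slice, PySem.Chars.slice_eq_listSlice, hb]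
    rw [PySem.List.slice_from _ (show (0:Int) ≤ 11 by omega)]
    rfl
  rw [h11]
  simp [List.splitOn, List.splitOnP_cons]

theorem pv_removeprefix_toList (base pre : String) (h : PySem.Str.startswith base pre = true) :
    (pvRemoveprefix base pre).toList = base.toList.drop pre.toList.length := by
  rw [pvRemoveprefix, if_pos h, String.toList_ofList]

theorem pv_rp (base pre : String) (r : List Char) (hp : PySem.Str.startswith base pre = true)
    (hb : base.toList = pre.toList ++ r) : pvRemoveprefix base pre = String.ofList r := by
  rw [← String.toList_inj, pv_removeprefix_toList base pre hp, String.toList_ofList, hb,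
      List.drop_append_of_le_length (le_refl _)]
  simp

theorem pv_agg_eq (s base : String) (agg : String)
    (hkey : ∀ b : Bool,
      (if agg == "by_ID" then (if b then "by_ID_inc_text" else "by_ID_exc_text")
       else (if b then "by_phase_inc_text" else "by_phase_exc_text"))
        = agg ++ (if b then "_inc_text" else "_exc_text"))
    (hD : pvD_base base.toList = false) :
    pvA_agg s base agg = pvB_agg s base agg := by
  unfold pvA_agg pvB_agg
  dsimp only
  rw [hkey]
  set key := agg ++ (if (PySem.Str.isIn "_text_" s || PySem.Str.endswith s "_text") then "_inc_text" else "_exc_text") with hkeydef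
  unfold pvA_fusion
  by_cases hp1 : PySem.Str.startswith base "Early_Fusion_"
  · obtain ⟨r, hb⟩ := (pv_startswith_early base.toList).mp (by simpa [PySem.Str.startswith] using hp1)
    have hrB : pvRemoveprefix base "Early_Fusion_" = String.ofList r := pv_rp base _ r hp1 hb
    have hDr : pvD_rest r = false := by
      have := hD
      rw [pvD_base] at this
      rw [if_pos (by exact (pv_startswith_early base.toList).mpr ⟨r, hb⟩)] at this
      rw [hb, List.drop_append_of_le_length (by decide)] at this
      simpa using this
    simp only [hp1, if_true]
    rw [pv_tokensA_early base r hb, hrB]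
    exact pv_fusion_eq r agg key hDr
  · by_cases hp2 : PySem.Str.startswith base "Late_Fusion_"
    · obtain ⟨r, hb⟩ := (pv_startswith_late base.toList).mp (by simpa [PySem.Str.startswith] using hp2)
      have hrB : pvRemoveprefix base "Late_Fusion_" = String.ofList r := pv_rp base _ r hp2 hb
      have hDr : pvD_rest r = false := by
        have := hD
        rw [pvD_base] at this
        rw [if_neg (by simpa [PySem.Str.startswith] using hp1)] at this
        rw [if_pos (by exact (pv_startswith_late base.toList).mpr ⟨r, hb⟩)] at this
        rw [hb, List.drop_append_of_le_length (by decide)] at this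
        simpa using this
      simp only [hp1, hp2, if_true]
      rw [pv_tokensA_late base r hb, hrB]
      exact pv_fusion_eq r agg key hDr
    · simp at hp1 hp2
      simp [hp1, hp2]

theorem pv_baseA6 (s : String) (h : PySem.Str.endswith s "_by_ID" = true) :
    PySem.Str.slice s none (some (-6)) = pvRemovesuffix s "_by_ID" := by
  rw [pvRemovesuffix, if_pos h, ← String.toList_inj, String.toList_ofList]
  simp only [PySem.Str.slice, String.toList_ofList, PySem.Chars.slice_eq_listSlice]
  rw [PySem.List.slice_to_neg_ofNat s.toList 6 (by omega)]
  simp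

theorem pv_baseA8 (s : String) (h : PySem.Str.endswith s "_byPhase" = true) :
    PySem.Str.slice s none (some (-8)) = pvRemovesuffix s "_byPhase" := by
  rw [pvRemovesuffix, if_pos h, ← String.toList_inj, String.toList_ofList]
  simp only [PySem.Str.slice, String.toList_ofList, PySem.Chars.slice_eq_listSlice]
  rw [PySem.List.slice_to_neg_ofNat s.toList 8 (by omega)]
  simp

-- ===== tight-direction lemmas =====

theorem pv_join_len (parts : List String) :
    (PySem.Str.join "_" parts).toList = PySem.Chars.join ['_'] (parts.map String.toList) := by
  simp [PySem.Str.join]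

theorem pv_pyGetD_zero (d x : String) (l : List String) : PySem.List.pyGetD (x :: l) 0 d = x := by
  simp [pysem]

theorem pv_fusion_ne (r : List Char) (agg keyA keyB : String) (hr : pvD_rest r = true) :
    ((pvA_condPhase ("" :: (r.splitOn '_').map String.ofList)).1,
     (pvA_condPhase ("" :: (r.splitOn '_').map String.ofList)).2, agg, keyA)
      ≠ pvB_tail (String.ofList r) agg keyB := by
  have hrne : r ≠ [] := by
    intro h; subst h; simp [pvD_rest] at hr
  have hall : ∀ t ∈ r.splitOn '_', pvIsMod t = false := by
    simpa [pvD_rest, hrne] using hr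
  have hallQ : ∀ t ∈ ("" :: (r.splitOn '_').map String.ofList), pvQ t = true := by
    intro t ht
    rcases List.mem_cons.mp ht with h | h
    · subst h; decide
    · obtain ⟨tc, htc, rfl⟩ := List.mem_map.mp h
      rw [pvQ_ofList, hall tc htc]; rfl
  have hts : pvSuffix ("" :: (r.splitOn '_').map String.ofList) = "" :: (r.splitOn '_').map String.ofList :=
    pvSuffix_of_all _ hallQ
  have htsB : pvSuffix ((r.splitOn '_').map String.ofList) = (r.splitOn '_').map String.ofList :=
    pvSuffix_of_all _ (fun t ht => hallQ t (List.mem_cons_of_mem _ ht))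
  rw [pvB_tail_eq]
  simp only [String.toList_ofList]
  rw [pvA_condPhase_eq, hts, htsB]
  have hnn : r.splitOn '_' ≠ [] := by
    rw [List.splitOn]; exact List.splitOnP_ne_nil _ _
  obtain ⟨t0c, tsc, hsplit⟩ := List.exists_cons_of_ne_nil hnn
  rw [hsplit]
  by_cases ht0 : t0c = []
  · subst ht0
    cases tsc with
    | nil =>
      exfalso
      have hic : [ '_' ].intercalate (r.splitOn '_') = r := List.intercalate_splitOn r '_'
      rw [hsplit] at hic
      simp [List.intercalate] at hic
      exact hrne hic
    | cons u us =>
      intro heq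
      have h2 := congrArg (fun p => p.2.1) heq
      simp only at h2
      have := congrArg (fun x => x.toList.length) h2
      simp only [pv_join_len] at this
      rw [PySem.List.slice_from_one, PySem.List.slice_from_one] at this
      simp only [List.tail_cons, List.map_cons] at this
      rw [PySem.Chars.join_cons_cons] at this
      simp at this
  · intro heq
    have h1 := congrArg (fun p => p.1) heq
    simp only at h1
    simp only [List.map_cons] at h1
    rw [if_neg (by simp), if_neg (by simp), pv_pyGetD_zero, pv_pyGetD_zero] at h1
    rw [show ("" : String) = String.ofList [] from rfl, pv_ofList_inj] at h1
    exact ht0 h1.symm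

theorem pv_agg_ne (s base : String) (agg : String) (hD : pvD_base base.toList = true) :
    pvA_agg s base agg ≠ pvB_agg s base agg := by
  unfold pvA_agg pvB_agg pvA_fusion
  dsimp only
  by_cases hp1 : PySem.Str.startswith base "Early_Fusion_"
  · obtain ⟨r, hb⟩ := (pv_startswith_early base.toList).mp (by simpa [PySem.Str.startswith] using hp1)
    have hrB : pvRemoveprefix base "Early_Fusion_" = String.ofList r := pv_rp base _ r hp1 hb
    have hDr : pvD_rest r = true := by
      have := hD
      rw [pvD_base] at this
      rw [if_pos (by exact (pv_startswith_early base.toList).mpr ⟨r, hb⟩)] at this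
      rw [hb, List.drop_append_of_le_length (by decide)] at this
      simpa using this
    simp only [hp1, if_true]
    rw [pv_tokensA_early base r hb, hrB]
    exact pv_fusion_ne r agg _ _ hDr
  · by_cases hp2 : PySem.Str.startswith base "Late_Fusion_"
    · obtain ⟨r, hb⟩ := (pv_startswith_late base.toList).mp (by simpa [PySem.Str.startswith] using hp2)
      have hrB : pvRemoveprefix base "Late_Fusion_" = String.ofList r := pv_rp base _ r hp2 hb
      have hDr : pvD_rest r = true := by
        have := hD
        rw [pvD_base] at this
        rw [if_neg (by simpa [PySem.Str.startswith] using hp1)] at this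
        rw [if_pos (by exact (pv_startswith_late base.toList).mpr ⟨r, hb⟩)] at this
        rw [hb, List.drop_append_of_le_length (by decide)] at this
        simpa using this
      simp only [hp1, hp2, if_true]
      rw [pv_tokensA_late base r hb, hrB]
      exact pv_fusion_ne r agg _ _ hDr
    · exfalso
      rw [pvD_base, if_neg (by simpa [PySem.Str.startswith] using hp1),
          if_neg (by simpa [PySem.Str.startswith] using hp2)] at hD
      exact Bool.false_ne_true hD

theorem pv_rest_iff (r : List Char) :
    pvD_rest r = true ↔ (r ≠ [] ∧ ∀ t ∈ r.splitOn '_', PySem.Chars.lower t ∉ MODALITIES.map String.toList) := by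
  simp [pvD_rest, pvIsMod]

theorem pv_base_iff (b : List Char) :
    pvD_base b = true ↔
      ∃ pre ∈ ["Early_Fusion_".toList, "Late_Fusion_".toList],
        pre <+: b ∧ b.drop pre.length ≠ [] ∧
        ∀ t ∈ (b.drop pre.length).splitOn '_', PySem.Chars.lower t ∉ MODALITIES.map String.toList := by
  constructor
  · intro h
    rw [pvD_base] at h
    by_cases hE : PySem.Chars.startswith b "Early_Fusion_".toList
    · rw [if_pos hE] at h
      exact ⟨"Early_Fusion_".toList, by simp, (PySem.Chars.startswith_iff _ _).mp hE,
             ((pv_rest_iff _).mp h).1, ((pv_rest_iff _).mp h).2⟩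
    · rw [if_neg hE] at h
      by_cases hL : PySem.Chars.startswith b "Late_Fusion_".toList
      · rw [if_pos hL] at h
        exact ⟨"Late_Fusion_".toList, by simp, (PySem.Chars.startswith_iff _ _).mp hL,
               ((pv_rest_iff _).mp h).1, ((pv_rest_iff _).mp h).2⟩
      · rw [if_neg hL] at h
        exact absurd h (by simp)
  · rintro ⟨pre, hmem, hpfx, hne, hall⟩
    rcases (by simpa using hmem : pre = "Early_Fusion_".toList ∨ pre = "Late_Fusion_".toList) with rfl | rfl
    · rw [pvD_base, if_pos ((PySem.Chars.startswith_iff _ _).mpr hpfx)]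
      exact (pv_rest_iff _).mpr ⟨hne, hall⟩
    · have hnotE : ¬ PySem.Chars.startswith b "Early_Fusion_".toList = true := by
        intro hE
        have := List.prefix_of_prefix_length_le hpfx ((PySem.Chars.startswith_iff _ _).mp hE)
          (by decide)
        revert this; decide
      rw [pvD_base, if_neg hnotE, if_pos ((PySem.Chars.startswith_iff _ _).mpr hpfx)]
      exact (pv_rest_iff _).mpr ⟨hne, hall⟩

theorem pv_D_unfold (s : String) :
    D_parse_config_folder_name s ↔
      (if PySem.Str.endswith s "_by_ID" then
         pvD_base (s.toList.take (s.toList.length - 6))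
       else if PySem.Str.endswith s "_byPhase" then
         pvD_base (s.toList.take (s.toList.length - 8))
       else false) = true := by
  constructor
  · rintro ⟨suf, hsmem, pre, hpmem, hsfx, hpfx, hne, hall⟩
    rcases (by simpa using hsmem : suf = "_by_ID".toList ∨ suf = "_byPhase".toList) with rfl | rfl
    · rw [if_pos (show PySem.Str.endswith s "_by_ID" = true from (PySem.Chars.endswith_iff _ _).mpr hsfx)]
      exact (pv_base_iff _).mpr ⟨pre, hpmem, hpfx, hne, hall⟩
    · have hnot6 : ¬ PySem.Str.endswith s "_by_ID" = true := by
        intro h6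
        have := List.suffix_of_suffix_length_le ((PySem.Chars.endswith_iff s.toList _).mp h6) hsfx
          (by decide)
        revert this; decide
      rw [if_neg hnot6,
          if_pos (show PySem.Str.endswith s "_byPhase" = true from (PySem.Chars.endswith_iff _ _).mpr hsfx)]
      exact (pv_base_iff _).mpr ⟨pre, hpmem, hpfx, hne, hall⟩
  · intro h
    by_cases h6 : PySem.Str.endswith s "_by_ID"
    · rw [if_pos h6] at h
      obtain ⟨pre, hpmem, hpfx, hne, hall⟩ := (pv_base_iff _).mp h
      exact ⟨"_by_ID".toList, by simp, pre, hpmem,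
             (PySem.Chars.endswith_iff s.toList _).mp h6, hpfx, hne, hall⟩
    · rw [if_neg h6] at h
      by_cases h8 : PySem.Str.endswith s "_byPhase"
      · rw [if_pos h8] at h
        obtain ⟨pre, hpmem, hpfx, hne, hall⟩ := (pv_base_iff _).mp h
        exact ⟨"_byPhase".toList, by simp, pre, hpmem,
               (PySem.Chars.endswith_iff s.toList _).mp h8, hpfx, hne, hall⟩
      · rw [if_neg h8] at h
        exact absurd h (by simp)

theorem pv_removesuffix_toList6 (s : String) (h : PySem.Str.endswith s "_by_ID" = true) :
    (pvRemovesuffix s "_by_ID").toList = s.toList.take (s.toList.length - ("_by_ID" : String).toList.length) := by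
  rw [pvRemovesuffix, if_pos h, String.toList_ofList]

theorem pv_removesuffix_toList8 (s : String) (h : PySem.Str.endswith s "_byPhase" = true) :
    (pvRemovesuffix s "_byPhase").toList = s.toList.take (s.toList.length - ("_byPhase" : String).toList.length) := by
  rw [pvRemovesuffix, if_pos h, String.toList_ofList]

-- ===== VERDICT (by name: the statement is the Claim_ definition above) =====
theorem parse_config_folder_name_spec : Claim_unchanged_parse_config_folder_name := by
  intro s _hdom hnd
  rw [pv_D_unfold] at hnd
  unfold parse_config_folder_name parse_config_folder_name_alt
  by_cases h1 : PySem.Str.endswith s "_by_ID"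
  · have h1c := h1
    simp at h1c
    simp only [h1, if_true]
    rw [pv_baseA6 s h1]
    apply pv_agg_eq
    · intro b; cases b <;> rfl
    · rw [pv_removesuffix_toList6 s h1]
      simpa [h1c] using hnd
  · by_cases h2 : PySem.Str.endswith s "_byPhase"
    · have h1c := h1
      have h2c := h2
      simp at h1c h2c
      simp only [h1, h2, if_true]
      rw [pv_baseA8 s h2]
      apply pv_agg_eq
      · intro b; cases b <;> rfl
      · rw [pv_removesuffix_toList8 s h2]
        simpa [h1c, h2c] using hnd
    · simp at h1 h2
      simp [h1, h2]

theorem parse_config_folder_name_changed : Claim_changed_parse_config_folder_name := by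
  unfold Claim_changed_parse_config_folder_name; decide

theorem parse_config_folder_name_tight : Claim_exact_parse_config_folder_name := by
  intro s _hdom hD
  rw [pv_D_unfold] at hD
  unfold parse_config_folder_name parse_config_folder_name_alt
  by_cases h1 : PySem.Str.endswith s "_by_ID"
  · have h1c := h1
    simp at h1c
    simp only [h1, if_true]
    rw [pv_baseA6 s h1]
    apply pv_agg_ne
    rw [pv_removesuffix_toList6 s h1]
    simpa [h1c] using hD
  · by_cases h2 : PySem.Str.endswith s "_byPhase"
    · have h1c := h1
      have h2c := h2
      simp at h1c h2c
      simp only [h1, h2, if_true]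
      rw [pv_baseA8 s h2]
      apply pv_agg_ne
      rw [pv_removesuffix_toList8 s h2]
      simpa [h1c, h2c] using hD
    · have h1c := h1
      have h2c := h2
      simp at h1c h2c
      simp [h1c, h2c] at hD
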